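-- pv_equiv track=rewrite | github.com/cailleanC1C/C1C-Recruitment | shared/utils/humanize.py | humanize_duration
-- ===== SOURCE A (Python) =====
-- from typing import Optional
--
-- def humanize_duration(seconds: Optional[int]) -> str:
--     """Return a compact representation of ``seconds`` (fail-soft)."""
--
--     if seconds is None:
--         return "-"
--     total = max(0, int(seconds))
--     units = (("d", 86400), ("h", 3600), ("m", 60), ("s", 1))
--     parts: list[str] = []
--     for suffix, length in units:
--         if total >= length:
--             qty, total = divmod(total, length)
--             parts.append(f"{qty}{suffix}")
--         if len(parts) == 2:
--             break
--     if not parts: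
--         parts.append("0s")
--     return "".join(parts)
-- ===== SOURCE B (Python) =====
-- def humanize_duration(seconds):
--     """Return a compact representation of ``seconds`` (fail-soft)."""
--     if seconds is None:
--         return "-"
--     t = max(0, int(seconds))
--     d = t // 86400
--     h = t // 3600 % 24
--     m = t // 60 % 60
--     s = t % 60
--     if d:
--         return f"{d}d" + (f"{h}h" if h else f"{m}m" if m else f"{s}s" if s else "")
--     if h:
--         return f"{h}h" + (f"{m}m" if m else f"{s}s" if s else "")
--     if m:
--         return f"{m}m" + (f"{s}s" if s else "")
--     return f"{s}s"
-- ===== Notes on version B (the rewrite author's own statement) =====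
-- stated objective: alternative
-- what changed: B replaces A's loop over a unit table with conditional divmod, part accumulation and early break by loop-free code: four independent modular-arithmetic formulas (t//86400, t//3600%24, t//60%60, t%60) and an explicit decision tree that formats the leading unit and at most one trailing unit, with no list, no join and no mutation.
import Mathlib
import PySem

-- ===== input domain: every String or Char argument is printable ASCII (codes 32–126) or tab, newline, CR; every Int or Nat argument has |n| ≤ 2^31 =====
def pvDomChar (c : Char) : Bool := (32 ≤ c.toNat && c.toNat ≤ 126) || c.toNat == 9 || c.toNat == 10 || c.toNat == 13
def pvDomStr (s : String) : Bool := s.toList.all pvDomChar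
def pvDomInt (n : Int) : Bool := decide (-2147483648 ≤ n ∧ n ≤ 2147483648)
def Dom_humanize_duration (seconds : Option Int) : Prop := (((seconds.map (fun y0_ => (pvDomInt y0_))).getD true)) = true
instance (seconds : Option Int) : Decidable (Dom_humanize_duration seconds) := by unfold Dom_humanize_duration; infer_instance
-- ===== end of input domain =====

-- B replaces A's unit-table loop (conditional divmod, accumulated parts, early break) by loop-free independent modular formulas and an explicit decision tree; same return value.


-- ===== PORT A =====
-- loop over the unit table, conditionally dividing and appending, breaking when two parts exist
def humanizeLoopA : List (String × Int) → Int → List String → List String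
  | [], _, parts => parts
  | (suffix, length) :: rest, total, parts =>
    let st :=
      if total ≥ length then
        (PySem.Int.mod total length, parts ++ [PySem.Int.toStr (PySem.Int.floordiv total length) ++ suffix])
      else (total, parts)
    if st.2.length = 2 then st.2 else humanizeLoopA rest st.1 st.2

def humanize_duration (seconds : Option Int) : String :=
  match seconds with
  | none => "-"
  | some s =>
    let total := max 0 s
    let parts := humanizeLoopA [("d", 86400), ("h", 3600), ("m", 60), ("s", 1)] total []
    let parts := if parts = [] then parts ++ ["0s"] else parts
    PySem.Str.join "" parts

-- ===== PORT B =====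
-- independent per-unit arithmetic, then an explicit decision tree (no loop, no list)
def humanize_duration_alt (seconds : Option Int) : String :=
  match seconds with
  | none => "-"
  | some x =>
    let t := max 0 x
    let d := PySem.Int.floordiv t 86400
    let h := PySem.Int.mod (PySem.Int.floordiv t 3600) 24
    let m := PySem.Int.mod (PySem.Int.floordiv t 60) 60
    let s := PySem.Int.mod t 60
    if d ≠ 0 then
      PySem.Int.toStr d ++ "d" ++
        (if h ≠ 0 then PySem.Int.toStr h ++ "h"
         else if m ≠ 0 then PySem.Int.toStr m ++ "m"
         else if s ≠ 0 then PySem.Int.toStr s ++ "s" else "")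
    else if h ≠ 0 then
      PySem.Int.toStr h ++ "h" ++
        (if m ≠ 0 then PySem.Int.toStr m ++ "m"
         else if s ≠ 0 then PySem.Int.toStr s ++ "s" else "")
    else if m ≠ 0 then
      PySem.Int.toStr m ++ "m" ++
        (if s ≠ 0 then PySem.Int.toStr s ++ "s" else "")
    else
      PySem.Int.toStr s ++ "s"

-- ===== PRECONDITION & SPEC =====
def Spec_humanize_duration (seconds : Option Int) (out : String) : Prop := out = humanize_duration_alt seconds
instance (seconds : Option Int) (out : String) : Decidable (Spec_humanize_duration seconds out) := by unfold Spec_humanize_duration; infer_instance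

-- ===== CLAIM =====
def Claim_equal_humanize_duration : Prop := ∀ (seconds : Option Int), Dom_humanize_duration seconds → Spec_humanize_duration seconds (humanize_duration seconds)

-- ===== LEMMAS AND PROOFS =====

theorem join_two (a b : String) : PySem.Str.join "" [a, b] = a ++ b := by
  simp [PySem.Str.join, PySem.Chars.join_cons_cons, PySem.Chars.join_singleton]

theorem join_one (a : String) : PySem.Str.join "" [a] = a := by
  simp [PySem.Str.join, PySem.Chars.join_singleton]

-- ===== VERDICT =====

set_option maxRecDepth 40000 in
-- single-step evaluation lemmas for A's loop (used only by the proofs)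
theorem loop_nil (total : Int) (parts : List String) : humanizeLoopA [] total parts = parts := rfl

theorem loop_ge0 (suffix : String) (len : Int) (rest : List (String × Int)) (total : Int)
    (h : total ≥ len) :
    humanizeLoopA ((suffix, len) :: rest) total [] =
      humanizeLoopA rest (PySem.Int.mod total len)
        [PySem.Int.toStr (PySem.Int.floordiv total len) ++ suffix] := by
  simp [humanizeLoopA, if_pos h]

theorem loop_ge1 (p suffix : String) (len : Int) (rest : List (String × Int)) (total : Int)
    (h : total ≥ len) :
    humanizeLoopA ((suffix, len) :: rest) total [p] =
      [p, PySem.Int.toStr (PySem.Int.floordiv total len) ++ suffix] := by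
  simp [humanizeLoopA, if_pos h]

theorem loop_lt0 (suffix : String) (len : Int) (rest : List (String × Int)) (total : Int)
    (h : ¬ (total ≥ len)) :
    humanizeLoopA ((suffix, len) :: rest) total [] = humanizeLoopA rest total [] := by
  simp [humanizeLoopA, if_neg h]

theorem loop_lt1 (p suffix : String) (len : Int) (rest : List (String × Int)) (total : Int)
    (h : ¬ (total ≥ len)) :
    humanizeLoopA ((suffix, len) :: rest) total [p] = humanizeLoopA rest total [p] := by
  simp [humanizeLoopA, if_neg h]

theorem humanize_core (x : Int) : humanize_duration (some x) = humanize_duration_alt (some x) := by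
  unfold humanize_duration humanize_duration_alt
  simp only
  set t := max 0 x
  have ht : 0 ≤ t := le_max_left 0 x
  have md : ∀ a : Int, PySem.Int.mod a 86400 = a % 86400 := fun a => PySem.Int.mod_eq_emod_of_pos (by norm_num)
  have mh : ∀ a : Int, PySem.Int.mod a 3600 = a % 3600 := fun a => PySem.Int.mod_eq_emod_of_pos (by norm_num)
  have mm : ∀ a : Int, PySem.Int.mod a 60 = a % 60 := fun a => PySem.Int.mod_eq_emod_of_pos (by norm_num)
  have m24 : ∀ a : Int, PySem.Int.mod a 24 = a % 24 := fun a => PySem.Int.mod_eq_emod_of_pos (by norm_num)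
  have m1 : ∀ a : Int, PySem.Int.mod a 1 = a % 1 := fun a => PySem.Int.mod_eq_emod_of_pos (by norm_num)
  have fd : ∀ a : Int, PySem.Int.floordiv a 86400 = a / 86400 := fun a => PySem.Int.floordiv_eq_ediv_of_pos (by norm_num)
  have fh : ∀ a : Int, PySem.Int.floordiv a 3600 = a / 3600 := fun a => PySem.Int.floordiv_eq_ediv_of_pos (by norm_num)
  have fm : ∀ a : Int, PySem.Int.floordiv a 60 = a / 60 := fun a => PySem.Int.floordiv_eq_ediv_of_pos (by norm_num)
  have f1 : ∀ a : Int, PySem.Int.floordiv a 1 = a / 1 := fun a => PySem.Int.floordiv_eq_ediv_of_pos (by norm_num)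
  simp only [mm, m24, fd, fh, fm]
  by_cases h1 : (86400:Int) ≤ t
  · have hd : ¬ (t / 86400 = 0) := by omega
    rw [loop_ge0 "d" 86400 _ t h1]
    simp only [md, fd]
    by_cases h2 : (3600:Int) ≤ t % 86400
    · have hh : ¬ (t / 3600 % 24 = 0) := by omega
      have e : t % 86400 / 3600 = t / 3600 % 24 := by omega
      rw [loop_ge1 _ "h" 3600 _ _ h2]
      simp only [fh]
      rw [if_neg (List.cons_ne_nil _ _), join_two, if_pos hd, if_pos hh, e]
    · have hh : t / 3600 % 24 = 0 := by omega
      rw [loop_lt1 _ "h" 3600 _ _ h2]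
      by_cases h3 : (60:Int) ≤ t % 86400
      · have hm : ¬ (t / 60 % 60 = 0) := by omega
        have e : t % 86400 / 60 = t / 60 % 60 := by omega
        rw [loop_ge1 _ "m" 60 _ _ h3]
        simp only [fm]
        rw [if_neg (List.cons_ne_nil _ _), join_two, if_pos hd,
            if_neg (fun k => k hh), if_pos hm, e]
      · have hm : t / 60 % 60 = 0 := by omega
        rw [loop_lt1 _ "m" 60 _ _ h3]
        by_cases h4 : (1:Int) ≤ t % 86400
        · have hs : ¬ (t % 60 = 0) := by omega
          have e : t % 86400 / 1 = t % 60 := by omega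
          rw [loop_ge1 _ "s" 1 _ _ h4]
          simp only [f1]
          rw [if_neg (List.cons_ne_nil _ _), join_two, if_pos hd,
              if_neg (fun k => k hh), if_neg (fun k => k hm), if_pos hs, e]
        · have hs : t % 60 = 0 := by omega
          rw [loop_lt1 _ "s" 1 _ _ h4, loop_nil, if_neg (List.cons_ne_nil _ _), join_one,
              if_pos hd, if_neg (fun k => k hh), if_neg (fun k => k hm),
              if_neg (fun k => k hs), String.append_empty]
  · have hd : t / 86400 = 0 := by omega
    rw [loop_lt0 "d" 86400 _ t h1]
    by_cases h2 : (3600:Int) ≤ t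
    · have hh : ¬ (t / 3600 % 24 = 0) := by omega
      have e : t / 3600 % 24 = t / 3600 := by omega
      rw [loop_ge0 "h" 3600 _ t h2]
      simp only [mh, fh]
      by_cases h3 : (60:Int) ≤ t % 3600
      · have hm : ¬ (t / 60 % 60 = 0) := by omega
        have e2 : t % 3600 / 60 = t / 60 % 60 := by omega
        rw [loop_ge1 _ "m" 60 _ _ h3]
        simp only [fm]
        rw [if_neg (List.cons_ne_nil _ _), join_two, if_neg (fun k => k hd),
            if_pos hh, if_pos hm, e, e2]
      · have hm : t / 60 % 60 = 0 := by omega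
        rw [loop_lt1 _ "m" 60 _ _ h3]
        by_cases h4 : (1:Int) ≤ t % 3600
        · have hs : ¬ (t % 60 = 0) := by omega
          have e2 : t % 3600 / 1 = t % 60 := by omega
          rw [loop_ge1 _ "s" 1 _ _ h4]
          simp only [f1]
          rw [if_neg (List.cons_ne_nil _ _), join_two, if_neg (fun k => k hd),
              if_pos hh, if_neg (fun k => k hm), if_pos hs, e, e2]
        · have hs : t % 60 = 0 := by omega
          rw [loop_lt1 _ "s" 1 _ _ h4, loop_nil, if_neg (List.cons_ne_nil _ _), join_one,
              if_neg (fun k => k hd), if_pos hh, if_neg (fun k => k hm),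
              if_neg (fun k => k hs), String.append_empty, e]
    · have hh : t / 3600 % 24 = 0 := by omega
      rw [loop_lt0 "h" 3600 _ t h2]
      by_cases h3 : (60:Int) ≤ t
      · have hm : ¬ (t / 60 % 60 = 0) := by omega
        have e : t / 60 % 60 = t / 60 := by omega
        rw [loop_ge0 "m" 60 _ t h3]
        simp only [mm, fm]
        by_cases h4 : (1:Int) ≤ t % 60
        · have hs : ¬ (t % 60 = 0) := by omega
          have e2 : t % 60 / 1 = t % 60 := by omega
          rw [loop_ge1 _ "s" 1 _ _ h4]
          simp only [f1]
          rw [if_neg (List.cons_ne_nil _ _), join_two, if_neg (fun k => k hd),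
              if_neg (fun k => k hh), if_pos hm, if_pos hs, e, e2]
        · have hs : t % 60 = 0 := by omega
          rw [loop_lt1 _ "s" 1 _ _ h4, loop_nil, if_neg (List.cons_ne_nil _ _), join_one,
              if_neg (fun k => k hd), if_neg (fun k => k hh), if_pos hm,
              if_neg (fun k => k hs), String.append_empty, e]
      · have hm : t / 60 % 60 = 0 := by omega
        rw [loop_lt0 "m" 60 _ t h3]
        by_cases h4 : (1:Int) ≤ t
        · have hs : ¬ (t % 60 = 0) := by omega
          have e : t / 1 = t % 60 := by omega
          rw [loop_ge0 "s" 1 _ t h4, loop_nil]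
          simp only [f1]
          rw [if_neg (List.cons_ne_nil _ _), join_one, if_neg (fun k => k hd),
              if_neg (fun k => k hh), if_neg (fun k => k hm), e]
        · have ht0 : t % 60 = 0 := by omega
          rw [loop_lt0 "s" 1 _ t h4, loop_nil, if_pos rfl, List.nil_append, join_one,
              if_neg (fun k => k hd), if_neg (fun k => k hh), if_neg (fun k => k hm), ht0]
          decide

-- ===== VERDICT =====
theorem humanize_duration_spec : Claim_equal_humanize_duration := by
  intro seconds _
  unfold Spec_humanize_duration
  cases seconds with
  | none => rfl
  | some x => exact humanize_core x
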